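-- pv_equiv track=rewrite | github.com/dodobas/waterboard | django_project/imports/processing/functions.py | for_update
-- ===== SOURCE A (Python) =====
-- def for_update(row_file, row_db):
--     """
--     Checks if row in uploaded file is equal to record in database with same feature_uuid value.
--
--     Takes two arguments:
--             - "row_file" (dictionary that contains data from row in uploaded file)
--             - "row_db" (dictionary that contains data from record in database)
--
--     Returns "should be updated" boolean value which is True if row in uploaded file differs from corresponding record in
--     database and False if it doesn't.
--     """
--
--     should_be_updated = False
--
--     for key, cell_file in row_file.items():
--         if key == 'changeset':
--             continue
--
--         try:
--             col_db = row_db[key]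
--         except KeyError:
--             continue
--
--         if cell_file == col_db:
--             should_be_updated = False
--         else:
--             should_be_updated = True
--             break
--
--     return should_be_updated
-- ===== SOURCE B (Python) =====
-- def for_update(row_file, row_db):
--     keys = [k for k in row_file if k != 'changeset' and k in row_db]
--     sub_file = {k: row_file[k] for k in keys}
--     sub_db = {k: row_db[k] for k in keys}
--     return sub_file != sub_db
-- ===== Notes on version B (the rewrite author's own statement) =====
-- stated objective: simpler
-- what changed: Replaces the early-exit key-by-key loop with accumulator and break by projecting both dicts onto the shared comparable keys and returning a single dict inequality.
import Mathlib
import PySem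

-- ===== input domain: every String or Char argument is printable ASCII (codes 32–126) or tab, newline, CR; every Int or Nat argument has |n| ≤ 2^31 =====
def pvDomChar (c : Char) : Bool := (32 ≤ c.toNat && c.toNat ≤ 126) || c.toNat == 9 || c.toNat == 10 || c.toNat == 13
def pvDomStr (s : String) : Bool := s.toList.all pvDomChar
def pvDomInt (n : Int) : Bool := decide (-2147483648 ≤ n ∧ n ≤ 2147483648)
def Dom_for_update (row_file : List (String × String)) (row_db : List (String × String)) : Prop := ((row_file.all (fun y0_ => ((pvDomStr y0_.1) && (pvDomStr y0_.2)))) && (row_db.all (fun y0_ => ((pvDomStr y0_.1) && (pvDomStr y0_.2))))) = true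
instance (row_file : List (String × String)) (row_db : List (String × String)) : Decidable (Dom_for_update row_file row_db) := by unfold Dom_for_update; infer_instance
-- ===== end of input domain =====

-- B replaces A's early-exit key-by-key loop with two projected dictionaries compared once (objective: simpler).


-- ===== PORT A =====
-- the for-loop over row_file.items() with the should_be_updated accumulator and break
def for_update_loop (row_db : List (String × String)) : List (String × String) → Bool → Bool
  | [], should_be_updated => should_be_updated
  | (key, cell_file) :: rest, should_be_updated =>
    if key = "changeset" then for_update_loop row_db rest should_be_updated
    else
      match (PySem.Dict.mk row_db).get? key with
      | none => for_update_loop row_db rest should_be_updated   -- KeyError: continue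
      | some col_db =>
        if cell_file = col_db then for_update_loop row_db rest false
        else true                                               -- should_be_updated = True; break

def for_update (row_file : List (String × String)) (row_db : List (String × String)) : Bool :=
  for_update_loop row_db row_file false

-- ===== PORT B =====
def for_update_alt (row_file : List (String × String)) (row_db : List (String × String)) : Bool :=
  let keys := (row_file.map Prod.fst).filter
    (fun k => (k != "changeset") && (PySem.Dict.mk row_db).contains k)
  let sub_file := keys.map (fun k => (k, (PySem.Dict.mk row_file).get? k))
  let sub_db := keys.map (fun k => (k, (PySem.Dict.mk row_db).get? k))
  decide (sub_file ≠ sub_db)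

-- ===== PRECONDITION & SPEC =====
-- Pre_ excludes row_file association lists with duplicate keys: a Python dict can never contain
-- duplicate keys, so such lists correspond to no dict input of A and their behaviour under the
-- association-list representation is accidental.
def Pre_for_update (row_file : List (String × String)) (row_db : List (String × String)) : Prop :=
  (row_file.map Prod.fst).Nodup
instance (row_file : List (String × String)) (row_db : List (String × String)) : Decidable (Pre_for_update row_file row_db) := by unfold Pre_for_update; infer_instance
def pvWitness_for_update : (List (String × String)) × (List (String × String)) :=
  ([("name", "well A"), ("zone", "east")], [("name", "well B"), ("zone", "east")])

def Spec_for_update (row_file : List (String × String)) (row_db : List (String × String)) (out : Bool) : Prop := out = for_update_alt row_file row_db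
instance (row_file : List (String × String)) (row_db : List (String × String)) (out : Bool) : Decidable (Spec_for_update row_file row_db out) := by unfold Spec_for_update; infer_instance

-- ===== CLAIM (what is proved, stated in full; the proofs are below) =====
def Claim_equal_for_update : Prop := ∀ (row_file : List (String × String)) (row_db : List (String × String)), Dom_for_update row_file row_db → Pre_for_update row_file row_db → Spec_for_update row_file row_db (for_update row_file row_db)

-- ===== LEMMAS AND PROOFS =====

-- the predicate "this pair of row_file witnesses a difference"
def pvMismatch (row_db : List (String × String)) (p : String × String) : Bool :=
  (p.1 != "changeset") &&
    (match (PySem.Dict.mk row_db).get? p.1 with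
     | none => false
     | some w => p.2 != w)

lemma for_update_loop_eq_any (row_db : List (String × String)) :
    ∀ rf : List (String × String), for_update_loop row_db rf false = rf.any (pvMismatch row_db) := by
  intro rf
  induction rf with
  | nil => rfl
  | cons p rest ih =>
    obtain ⟨k, v⟩ := p
    simp only [for_update_loop, List.any_cons, pvMismatch]
    by_cases hk : k = "changeset"
    · simp [hk, ih]
    · simp only [if_neg hk]
      cases hdb : (PySem.Dict.mk row_db).get? k with
      | none => simp [ih, hk]
      | some w =>
        by_cases hv : v = w
        · simp [ih, hk, hv]
        · simp [hk, hv]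

lemma for_update_alt_iff (row_file row_db : List (String × String))
    (hnd : (row_file.map Prod.fst).Nodup) :
    for_update_alt row_file row_db = true ↔
      ∃ p ∈ row_file, pvMismatch row_db p = true := by
  have hkeysnd : (PySem.Dict.mk row_file).keys.Nodup := by
    simpa [PySem.Dict.keys_mk] using hnd
  simp only [for_update_alt, decide_eq_true_eq, ne_eq, List.map_inj_left, not_forall]
  constructor
  · rintro ⟨k, hk, hne⟩
    simp only [List.mem_filter, List.mem_map, Bool.and_eq_true, bne_iff_ne, ne_eq] at hk
    obtain ⟨⟨p, hp, hpk⟩, hkc, hcont⟩ := hk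
    refine ⟨p, hp, ?_⟩
    have hgf : (PySem.Dict.mk row_file).get? k = some p.2 := by
      apply PySem.Dict.get?_of_mem_items _ _ hkeysnd
      rw [← hpk]
      simpa using hp
    have hsome : ((PySem.Dict.mk row_db).get? k).isSome := by
      rw [← PySem.Dict.contains_eq_isSome_get?]; exact hcont
    obtain ⟨w, hw⟩ := Option.isSome_iff_exists.mp hsome
    simp only [pvMismatch, hpk, hw, Bool.and_eq_true, bne_iff_ne, ne_eq]
    refine ⟨hkc, ?_⟩
    intro hvw
    apply hne
    simp only [hgf, hw, hvw]
  · rintro ⟨⟨k, v⟩, hp, hm⟩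
    simp only [pvMismatch, Bool.and_eq_true, bne_iff_ne, ne_eq] at hm
    obtain ⟨hkc, hm⟩ := hm
    cases hdb : (PySem.Dict.mk row_db).get? k with
    | none => rw [hdb] at hm; simp at hm
    | some w =>
      rw [hdb] at hm
      have hvw : v ≠ w := by simpa using hm
      refine ⟨k, ?_, ?_⟩
      · simp only [List.mem_filter, List.mem_map, Bool.and_eq_true, bne_iff_ne, ne_eq]
        refine ⟨⟨(k, v), hp, rfl⟩, hkc, ?_⟩
        rw [PySem.Dict.contains_eq_isSome_get?, hdb]; rfl
      · have hgf : (PySem.Dict.mk row_file).get? k = some v :=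
          PySem.Dict.get?_of_mem_items _ hp hkeysnd
        simp only [Prod.mk.injEq, hgf, hdb, true_and]
        intro h
        exact hvw (Option.some.inj h)

-- ===== VERDICT (by name: the statement is the Claim_ definition above) =====
theorem for_update_spec : Claim_equal_for_update := by
  intro row_file row_db _ hpre
  unfold Spec_for_update
  rw [Bool.eq_iff_iff]
  rw [for_update, for_update_loop_eq_any, List.any_eq_true,
    for_update_alt_iff row_file row_db hpre]
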